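-- pv_equiv track=rewrite | github.com/vlelyavin/seoapp | app/analyzers/duplicates.py | _create_shingles
-- ===== SOURCE A (Python) =====
-- from typing import Any, Dict, List, Set, Tuple
--
-- def _create_shingles(text: str, shingle_size: int = 3) -> Set[Tuple[str, ...]]:
--     """Create shingles (n-word tuples) from text."""
--     words = text.split()
--     if len(words) < shingle_size:
--         return set()
--     return {
--         tuple(words[i : i + shingle_size])
--         for i in range(len(words) - shingle_size + 1)
--     }
-- ===== SOURCE B (Python) =====
-- from typing import Set, Tuple
--
-- def _create_shingles(text: str, shingle_size: int = 3) -> Set[Tuple[str, ...]]: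
--     """Create shingles (n-word tuples) from text by a single pass
--     maintaining a sliding window of the last shingle_size words."""
--     words = text.split()
--     if len(words) < shingle_size:
--         return set()
--     shingles = set()
--     window = []
--     for w in words:
--         window.append(w)
--         if len(window) > shingle_size:
--             window.pop(0)
--         if len(window) == shingle_size:
--             shingles.add(tuple(window))
--     return shingles
-- ===== Notes on version B (the rewrite author's own statement) =====
-- stated objective: alternative
-- what changed: Replaces the set comprehension that slices words[i:i+shingle_size] for every index with a single left-to-right pass maintaining a sliding window (append each word, drop the oldest when the window overflows, record the window when full), so no index arithmetic or per-shingle slicing remains.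
-- outside the precondition, e.g. on _create_shingles('', 0): A returns {()}, B returns set(); on _create_shingles('a b', -1): A returns {(), ('a',)}, B returns set(); on _create_shingles('a b', 0): A returns {()}, B returns {()}
import Mathlib
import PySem

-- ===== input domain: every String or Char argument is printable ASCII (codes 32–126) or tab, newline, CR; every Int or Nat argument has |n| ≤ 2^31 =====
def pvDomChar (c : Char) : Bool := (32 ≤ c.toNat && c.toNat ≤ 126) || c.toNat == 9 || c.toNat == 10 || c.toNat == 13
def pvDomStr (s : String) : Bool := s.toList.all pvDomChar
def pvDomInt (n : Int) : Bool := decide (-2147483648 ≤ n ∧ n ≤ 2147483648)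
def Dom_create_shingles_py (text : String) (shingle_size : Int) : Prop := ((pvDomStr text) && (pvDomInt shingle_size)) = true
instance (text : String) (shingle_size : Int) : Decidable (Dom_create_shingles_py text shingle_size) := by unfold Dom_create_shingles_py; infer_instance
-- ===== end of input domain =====

-- B replaces A's index-based slicing comprehension with a single pass that maintains a
-- sliding window of the last shingle_size words (alternative decomposition; same cost).


-- ===== PORT A =====
def create_shingles_py (text : String) (shingle_size : Int) : List (List String) :=
  let words := PySem.Str.split₀ text
  if (words.length : Int) < shingle_size then []
  else
    PySem.Set.ofList
      ((PySem.List.pyRange 0 ((words.length : Int) - shingle_size + 1) 1).map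
        (fun i => PySem.List.slice words (some i) (some (i + shingle_size))))

-- ===== PORT B =====
-- one iteration of B's loop body: append w, pop the oldest word when the window
-- overflows (window is nonempty there, having just been appended to, so pop(0)
-- leaves exactly window.drop 1), record the window when it is full
def pvStep (shingle_size : Int) (st : List String × List (List String)) (w : String) :
    List String × List (List String) :=
  let window := st.1 ++ [w]
  let window := if shingle_size < (window.length : Int) then window.drop 1 else window
  let shingles := if (window.length : Int) == shingle_size then PySem.Set.add st.2 window else st.2
  (window, shingles)

def create_shingles_py_alt (text : String) (shingle_size : Int) : List (List String) :=
  let words := PySem.Str.split₀ text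
  if (words.length : Int) < shingle_size then []
  else
    (words.foldl (pvStep shingle_size) ([], PySem.Set.empty)).2

-- ===== PRECONDITION & SPEC =====
-- Pre_ restricts to the natural domain of positive shingle sizes: for shingle_size ≤ 0
-- (a nonsensical count) A's comprehension returns accidental degenerate sets such as {()}
-- (artefacts of empty/negative slices), which B's sliding window does not reproduce.
def Pre_create_shingles_py (text : String) (shingle_size : Int) : Prop := 1 ≤ shingle_size
instance (text : String) (shingle_size : Int) : Decidable (Pre_create_shingles_py text shingle_size) := by unfold Pre_create_shingles_py; infer_instance

def pvWitness_create_shingles_py : String × Int := ("the quick brown fox", 2)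

def Spec_create_shingles_py (text : String) (shingle_size : Int) (out : List (List String)) : Prop := out = create_shingles_py_alt text shingle_size
instance (text : String) (shingle_size : Int) (out : List (List String)) : Decidable (Spec_create_shingles_py text shingle_size out) := by unfold Spec_create_shingles_py; infer_instance

-- ===== CLAIM (what is proved, stated in full; the proofs are below) =====
def Claim_equal_create_shingles_py : Prop := ∀ (text : String) (shingle_size : Int), Dom_create_shingles_py text shingle_size → Pre_create_shingles_py text shingle_size → Spec_create_shingles_py text shingle_size (create_shingles_py text shingle_size)

-- ===== LEMMAS AND PROOFS =====

-- pvStep with a Nat-sized shingle count, with both branch conditions on Nats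
theorem pvStep_natCast (k : Nat) (st : List String × List (List String)) (w : String) :
    pvStep (k : Int) st w =
      (let window := st.1 ++ [w]
       let window := if k < window.length then window.drop 1 else window
       (window, if window.length = k then PySem.Set.add st.2 window else st.2)) := by
  simp only [pvStep, Nat.cast_lt, beq_iff_eq, Nat.cast_inj]

-- ramp-up: while the window is strictly below size k, the loop only extends it,
-- adding the window to the set exactly when it becomes full on the last word
theorem pvRamp (k : Nat) (p : List String) : ∀ (win : List String) (s : List (List String)),
    win.length < k → win.length + p.length ≤ k →
    p.foldl (pvStep (k : Int)) (win, s) =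
      (win ++ p, if win.length + p.length = k then PySem.Set.add s (win ++ p) else s) := by
  induction p with
  | nil =>
    intro win s hwlt _
    simp only [List.foldl_nil, List.append_nil, List.length_nil, Nat.add_zero]
    rw [if_neg (Nat.ne_of_lt hwlt)]
  | cons w p' ih =>
    intro win s hwlt h
    rw [List.foldl_cons, pvStep_natCast]
    have hno : ¬ k < (win ++ [w]).length := by
      simp only [List.length_append, List.length_cons, List.length_nil]; omega
    simp only [hno, if_false]
    cases p' with
    | nil =>
      simp only [List.foldl_nil, List.length_append, List.length_cons, List.length_nil,
        Nat.zero_add, Nat.add_zero]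
    | cons y t =>
      have hlw : (win ++ [w]).length = win.length + 1 := by simp
      simp only [List.length_cons] at h
      have hlt : win.length + 1 < k := by omega
      rw [if_neg (show ¬ (win ++ [w]).length = k by rw [hlw]; omega)]
      rw [ih (win ++ [w]) s (by rw [hlw]; omega)
        (by rw [hlw]; simp only [List.length_cons]; omega)]
      simp only [List.length_append, List.length_cons, List.length_nil, List.append_assoc,
        List.cons_append, List.nil_append]
      congr 1
      exact if_congr (by omega) rfl rfl

-- sliding phase: once the window is full, each further word slides it by one and
-- adds the new window; the windows added are the successive k-wide slices
theorem pvSlide (k : Nat) (p : List String) :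
    ∀ (win : List String) (s : List (List String)), win.length = k → 1 ≤ k →
    (p.foldl (pvStep (k : Int)) (win, s)).2 =
      PySem.Set.update s ((List.range p.length).map
        (fun j => ((win ++ p).drop (j + 1)).take k)) := by
  induction p with
  | nil => intro win s _ _; simp [PySem.Set.update]
  | cons w p' ih =>
    intro win s hwin hk
    rw [List.foldl_cons, pvStep_natCast]
    have hov : k < (win ++ [w]).length := by simp [hwin]
    have hlen : ((win ++ [w]).drop 1).length = k := by simp [hwin]
    simp only [hov, if_pos, hlen, if_pos]
    rw [ih ((win ++ [w]).drop 1) _ hlen hk]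
    have hwin1 : win ≠ [] := by intro hnil; rw [hnil] at hwin; simp at hwin; omega
    have hd : ∀ j : Nat, ((win ++ [w]).drop 1 ++ p').drop j = (win ++ w :: p').drop (j + 1) := by
      intro j
      cases win with
      | nil => exact absurd rfl hwin1
      | cons a tl => simp [List.append_assoc]
    have hfirst : ((win ++ w :: p').drop 1).take k = (win ++ [w]).drop 1 := by
      rw [show win ++ w :: p' = (win ++ [w]) ++ p' by simp,
        List.drop_append_of_le_length (by simp),
        List.take_append_of_le_length (le_of_eq hlen.symm),
        List.take_of_length_le (le_of_eq hlen)]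
    simp only [List.length_cons, List.range_succ_eq_map, List.map_cons, List.map_map,
      Function.comp_def, hd, hfirst]
    rfl

theorem pvSet_update_cons (x : List String) (l : List (List String)) :
    PySem.Set.ofList (x :: l) = PySem.Set.update (PySem.Set.add PySem.Set.empty x) l := by
  rfl

-- ===== VERDICT (by name: the statement is the Claim_ definition above) =====
theorem create_shingles_py_spec : Claim_equal_create_shingles_py := by
  intro text s _hdom hpre
  unfold Spec_create_shingles_py create_shingles_py create_shingles_py_alt
  set w := PySem.Str.split₀ text with hw
  by_cases hlt : (w.length : Int) < s
  · simp [hlt]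
  · simp only [hlt, if_neg, not_false_iff]
    have hs0 : (1 : Int) ≤ s := hpre
    obtain ⟨k, hk, hk1⟩ : ∃ k : Nat, s = (k : Int) ∧ 1 ≤ k := by
      refine ⟨s.toNat, by omega, by omega⟩
    subst hk
    have hkw : k ≤ w.length := by exact_mod_cast not_lt.mp hlt
    -- A side: pyRange/slices become the k-wide windows
    have hbound : (w.length : Int) - (k : Int) + 1 = ((w.length - k + 1 : Nat) : Int) := by
      omega
    have ha : (PySem.List.pyRange 0 ((w.length : Int) - (k : Int) + 1) 1).map
          (fun i => PySem.List.slice w (some i) (some (i + (k : Int))))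
        = (List.range (w.length - k + 1)).map (fun j => (w.drop j).take k) := by
      rw [hbound, PySem.List.pyRange_one]
      simp only [sub_zero, Int.toNat_natCast, List.map_map, Function.comp_def, zero_add,
        PySem.List.slice_natCast_add]
    rw [ha]
    -- B side: ramp-up over the first k words, then slide over the rest
    have hsplit : w = w.take k ++ w.drop k := (List.take_append_drop k w).symm
    have htk : (w.take k).length = k := by simp [hkw]
    rw [show w.foldl (pvStep (k : Int)) ([], PySem.Set.empty)
          = (w.drop k).foldl (pvStep (k : Int))
              ((w.take k).foldl (pvStep (k : Int)) ([], PySem.Set.empty)) by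
        rw [← List.foldl_append, ← hsplit]]
    rw [pvRamp k (w.take k) [] PySem.Set.empty (by simpa using hk1) (by simp [htk]),
      if_pos (by simp [htk]), List.nil_append]
    rw [pvSlide k (w.drop k) (w.take k) _ htk hk1]
    rw [← hsplit]
    -- both sides are now ofList / update over the same window list
    have hn : w.length - k + 1 = (w.length - k) + 1 := by omega
    rw [hn, List.range_succ_eq_map, List.map_cons, List.map_map]
    rw [pvSet_update_cons]
    have hdk : (w.drop k).length = w.length - k := by simp
    rw [hdk]
    simp only [List.drop_zero, Function.comp_def]
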